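-- pv_equiv track=rewrite | github.com/EslamAsHhraf/RSA-Crypto-Chat | src/utlies.py | find_p_q
-- ===== SOURCE A (Python) =====
-- import math
--
-- def find_p_q (n):
--     c = 2
--     p=q=1
--     limit = int(math.sqrt(n))
--     for i in range(2,limit+1):
--         if(n % i == 0):
--             p=i
--             q=n//i
--
--     return (p,q)
-- ===== SOURCE B (Python) =====
-- import math
--
-- def find_p_q(n):
--     limit = int(math.sqrt(n))
--     for i in range(limit, 1, -1):
--         if n % i == 0:
--             return (i, n // i)
--     return (1, 1)
-- ===== Notes on version B (the rewrite author's own statement) =====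
-- stated objective: alternative
-- what changed: B searches downward from int(sqrt(n)) and returns at the first divisor found (early exit, no accumulator), instead of A's upward scan that overwrites (p,q) at every divisor and returns the last one.
import Mathlib
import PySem

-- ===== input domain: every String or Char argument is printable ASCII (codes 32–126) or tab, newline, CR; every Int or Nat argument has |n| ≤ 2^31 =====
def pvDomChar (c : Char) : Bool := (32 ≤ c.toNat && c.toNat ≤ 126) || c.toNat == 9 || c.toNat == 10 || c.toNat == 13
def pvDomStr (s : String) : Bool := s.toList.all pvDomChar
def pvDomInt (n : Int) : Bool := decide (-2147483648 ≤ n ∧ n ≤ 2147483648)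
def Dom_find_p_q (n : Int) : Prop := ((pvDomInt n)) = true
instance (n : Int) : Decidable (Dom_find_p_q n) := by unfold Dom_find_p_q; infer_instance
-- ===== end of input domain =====

-- B searches downward from int(sqrt(n)) and returns at the first divisor found, instead of
-- A's upward scan keeping the last divisor; same value everywhere A returns (objective: alternative).

-- ===== PORT A =====
-- int(math.sqrt(n)) = Nat.sqrt n.toNat: exact on Dom (|n| ≤ 2^31, well below the 2^52
-- double-precision threshold); for n < 0 math.sqrt raises ValueError, excluded by Pre_.
def find_p_q (n : Int) : Int × Int :=
  let limit : Int := (Nat.sqrt n.toNat : Int)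
  (PySem.List.pyRange 2 (limit + 1) 1).foldl
    (fun pq i => if PySem.Int.mod n i = 0 then (i, PySem.Int.floordiv n i) else pq)
    (1, 1)

-- ===== PORT B =====
-- downward loop 'for i in range(limit, 1, -1): if n % i == 0: return …' as structural
-- recursion on the counter i; falls through to (1, 1).
def pvSearchDown (n : Int) (i : Nat) : Int × Int :=
  if i < 2 then (1, 1)
  else if PySem.Int.mod n (i : Int) = 0 then ((i : Int), PySem.Int.floordiv n (i : Int))
  else pvSearchDown n (i - 1)

def find_p_q_alt (n : Int) : Int × Int :=
  pvSearchDown n (Nat.sqrt n.toNat)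

-- ===== PRECONDITION & SPEC =====
-- math.sqrt raises ValueError on negative n in both A and B, so Pre_ requires 0 ≤ n.
def Pre_find_p_q (n : Int) : Prop := 0 ≤ n
instance (n : Int) : Decidable (Pre_find_p_q n) := by unfold Pre_find_p_q; infer_instance
def pvWitness_find_p_q : Int := 12

def Spec_find_p_q (n : Int) (out : Int × Int) : Prop := out = find_p_q_alt n
instance (n : Int) (out : Int × Int) : Decidable (Spec_find_p_q n out) := by unfold Spec_find_p_q; infer_instance

-- ===== CLAIM (what is proved, stated in full; the proofs are below) =====
def Claim_equal_find_p_q : Prop := ∀ (n : Int), Dom_find_p_q n → Pre_find_p_q n → Spec_find_p_q n (find_p_q n)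

-- ===== LEMMAS AND PROOFS =====

-- A's left-to-right "keep the last divisor" fold over [2, m] equals B's downward
-- first-hit search starting at m, for every bound m.
theorem pv_fold_eq_searchDown (n : Int) (m : Nat) :
    (PySem.List.pyRange 2 ((m : Int) + 1) 1).foldl
      (fun pq i => if PySem.Int.mod n i = 0 then (i, PySem.Int.floordiv n i) else pq)
      (1, 1) = pvSearchDown n m := by
  induction m with
  | zero =>
      rw [PySem.List.pyRange_one_eq_nil (show ((0 : Nat) : Int) + 1 ≤ 2 by norm_num)]
      simp [pvSearchDown]
  | succ m ih =>
      by_cases h : m < 1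
      · interval_cases m
        rw [PySem.List.pyRange_one_eq_nil (show ((0 + 1 : Nat) : Int) + 1 ≤ 2 by norm_num)]
        simp [pvSearchDown]
      · have hb : (2 : Int) ≤ (m : Int) + 1 := by omega
        push_cast
        rw [PySem.List.pyRange_one_succ_right hb, List.foldl_append, ih]
        conv_rhs => rw [pvSearchDown]
        rw [if_neg (by omega : ¬ (m + 1 < 2))]
        have hm : m + 1 - 1 = m := by omega
        rw [hm]
        simp only [List.foldl_cons, List.foldl_nil]
        push_cast
        rfl

-- ===== VERDICT (by name: the statement is the Claim_ definition above) =====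
theorem find_p_q_spec : Claim_equal_find_p_q := by
  intro n _ _
  unfold Spec_find_p_q find_p_q find_p_q_alt
  exact pv_fold_eq_searchDown n (Nat.sqrt n.toNat)
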